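-- pv_equiv track=rewrite | github.com/saitamasensei0/FKamz | codes/probcsv.py | psort
-- ===== SOURCE A (Python) =====
-- def psort(lst) :
--     l = {}
--     for k in lst :
--         for did in lst[k] :
--             if did not in l :
--                 l[did] = lst[k][did]
--             else :
--                 l[did] = max(l[did],lst[k][did])
--     sl = sorted(l.items(), key = lambda kv:(kv[1], kv[0]))
--     return(sl)
-- ===== SOURCE B (Python) =====
-- def psort(lst):
--     # flatten every (id, value) pair, sort them all once by (value, id),
--     # then sweep backwards keeping the last (= maximal) pair of each id
--     flat = [(did, v) for k in lst for did, v in lst[k].items()]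
--     flat.sort(key=lambda kv: (kv[1], kv[0]))
--     out = []
--     seen = set()
--     for did, v in reversed(flat):
--         if did not in seen:
--             seen.add(did)
--             out.append((did, v))
--     out.reverse()
--     return out
-- ===== Notes on version B (the rewrite author's own statement) =====
-- stated objective: alternative
-- what changed: Removes the per-key max aggregation entirely: B flattens all (id, value) pairs, sorts the whole multiset once by (value, id), and then a backward sweep with a seen-set keeps the last (hence maximal) pair of each id, which is already in final order — no dict of running maxima, no max() reduction, no final sort of aggregated items.
import Mathlib
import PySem

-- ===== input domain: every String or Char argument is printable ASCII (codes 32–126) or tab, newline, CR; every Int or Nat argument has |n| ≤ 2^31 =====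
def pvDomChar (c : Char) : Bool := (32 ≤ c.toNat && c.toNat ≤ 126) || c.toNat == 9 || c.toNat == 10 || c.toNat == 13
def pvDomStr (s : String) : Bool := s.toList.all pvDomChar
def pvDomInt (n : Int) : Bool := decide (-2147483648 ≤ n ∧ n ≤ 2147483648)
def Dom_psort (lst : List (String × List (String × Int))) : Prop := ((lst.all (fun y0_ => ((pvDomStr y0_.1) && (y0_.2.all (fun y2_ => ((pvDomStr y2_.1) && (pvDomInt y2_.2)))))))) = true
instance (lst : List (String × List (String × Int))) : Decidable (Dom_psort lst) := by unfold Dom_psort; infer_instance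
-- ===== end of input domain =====

-- B drops A's per-key running-max dict: it flattens all pairs, sorts the whole multiset
-- once by (value, id) and keeps the last pair of each id in a backward sweep (objective: alternative).

-- ===== PORT A =====
-- literal port: 'for k in lst' / 'for did in lst[k]' iterate the dict's pairs;
-- 'l[did]' in the else branch is a present key, ported as getD with an unused default.
def psort (lst : List (String × List (String × Int))) : List (String × Int) :=
  let l := lst.foldl (fun l kv =>
    kv.2.foldl (fun l dv =>
      if l.contains dv.1 = false then l.insert dv.1 dv.2
      else l.insert dv.1 (max (l.getD dv.1 0) dv.2)) l)
    PySem.Dict.empty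
  PySem.List.sorted2 l.items (fun kv => kv.2) (fun kv => kv.1)

-- ===== PORT B =====
-- body of Source B's sweep loop: 'if did not in seen: seen.add(did); out.append((did, v))'
def pvStep (st : List (String × Int) × PySem.Set String) (dv : String × Int) :
    List (String × Int) × PySem.Set String :=
  if PySem.Set.contains st.2 dv.1 then st else (st.1 ++ [dv], PySem.Set.add st.2 dv.1)

-- flatten comprehension → flatMap; in-place sort with tuple key → sorted2; reversed/…/reverse literal
def psort_alt (lst : List (String × List (String × Int))) : List (String × Int) :=
  let flat := lst.flatMap (fun kv => kv.2)
  let s := PySem.List.sorted2 flat (fun kv => kv.2) (fun kv => kv.1)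
  let st := s.reverse.foldl pvStep ([], PySem.Set.empty)
  st.1.reverse

-- ===== PRECONDITION & SPEC =====
def Spec_psort (lst : List (String × List (String × Int))) (out : List (String × Int)) : Prop := out = psort_alt lst
instance (lst : List (String × List (String × Int))) (out : List (String × Int)) : Decidable (Spec_psort lst out) := by unfold Spec_psort; infer_instance

-- ===== CLAIM (what is proved, stated in full; the proofs are below) =====
def Claim_equal_psort : Prop := ∀ (lst : List (String × List (String × Int))), Dom_psort lst → Spec_psort lst (psort lst)

-- ===== LEMMAS AND PROOFS =====

-- Python's tuple key (kv[1], kv[0]) as one lexicographic key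
def pvKey (p : String × Int) : Lex (Int × String) := toLex (p.2, p.1)

-- A's inner-loop body; the grouping loop body used only to characterise A's dict
def pvStepA (l : PySem.Dict String Int) (dv : String × Int) : PySem.Dict String Int :=
  if l.contains dv.1 = false then l.insert dv.1 dv.2
  else l.insert dv.1 (max (l.getD dv.1 0) dv.2)

def pvStepG (g : PySem.Dict String (List Int)) (dv : String × Int) : PySem.Dict String (List Int) :=
  g.modify dv.1 [] (· ++ [dv.2])

def pvF : String × List Int → String × Int :=
  fun p => (p.1, (PySem.List.max? p.2 (fun x => x)).getD 0)

def pvMax (vs : List Int) : Int := (PySem.List.max? vs (fun x => x)).getD 0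

def pvVals (flat : List (String × Int)) (k : String) : List Int :=
  (flat.filter (fun p => p.1 == k)).map (fun p => p.2)

def pvItems (flat : List (String × Int)) : List (String × Int) :=
  (PySem.Set.ofList (flat.map (fun p => p.1))).map (fun k => (k, pvMax (pvVals flat k)))

-- recursion equivalent of Source B's sweep: keep the first pair of each unseen id
def pvKeep (seen : PySem.Set String) : List (String × Int) → List (String × Int)
  | [] => []
  | p :: t => if PySem.Set.contains seen p.1 then pvKeep seen t
              else p :: pvKeep (PySem.Set.add seen p.1) t

-- ---- A's dict is the per-key max of the grouping dict (value-map pvF on items) ----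

lemma pv_contains_mapF (l : List (String × List Int)) (k : String) :
    (PySem.Dict.mk (l.map pvF)).contains k = (PySem.Dict.mk l).contains k := by
  simp [PySem.Dict.contains, List.any_map, Function.comp_def, pvF]

lemma pv_get?_mapF (l : List (String × List Int)) (k : String) :
    (PySem.Dict.mk (l.map pvF)).get? k
      = ((PySem.Dict.mk l).get? k).map (fun vs => (PySem.List.max? vs (fun x => x)).getD 0) := by
  simp [PySem.Dict.get?, List.find?_map, Function.comp_def, pvF, Option.map_map]

lemma pv_insert_mapF (l : List (String × List Int)) (k : String) (vs : List Int) :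
    PySem.Dict.mk (((PySem.Dict.mk l).insert k vs).items.map pvF)
      = (PySem.Dict.mk (l.map pvF)).insert k ((PySem.List.max? vs (fun x => x)).getD 0) := by
  unfold PySem.Dict.insert
  rw [pv_contains_mapF]
  by_cases h : (PySem.Dict.mk l).contains k = true
  · simp only [h, if_pos]
    congr 1
    simp only [List.map_map]
    apply List.map_congr_left
    intro p _
    by_cases hq : p.1 = k <;> simp [pvF, hq]
  · simp only [h, if_neg, Bool.not_eq_true] at *
    simp [pvF]

lemma pv_mx_append (vs : List Int) (v : Int) (h : vs ≠ []) :
    (PySem.List.max? (vs ++ [v]) (fun x => x)).getD 0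
      = max ((PySem.List.max? vs (fun x => x)).getD 0) v := by
  obtain ⟨x, t, rfl⟩ := List.exists_cons_of_ne_nil h
  rw [show (x :: t) ++ [v] = x :: (t ++ [v]) from rfl]
  rw [PySem.List.max?_id_cons, PySem.List.max?_id_cons]
  simp [List.foldl_append]

lemma pv_step (g : PySem.Dict String (List Int)) (dv : String × Int)
    (hne : ∀ p ∈ g.items, p.2 ≠ []) :
    pvStepA (PySem.Dict.mk (g.items.map pvF)) dv
      = PySem.Dict.mk ((pvStepG g dv).items.map pvF) := by
  obtain ⟨did, v⟩ := dv
  unfold pvStepA pvStepG PySem.Dict.modify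
  by_cases h : g.contains did = true
  · have hsome : (g.get? did).isSome := by
      rw [← PySem.Dict.contains_eq_isSome_get?]; exact h
    obtain ⟨vs, hvs⟩ := Option.isSome_iff_exists.mp hsome
    have hvne : vs ≠ [] := hne _ (PySem.Dict.mem_items_of_get?_eq_some g hvs)
    have hmapc : (PySem.Dict.mk (g.items.map pvF)).contains did = true := by
      rw [pv_contains_mapF]; exact h
    have hgd : g.getD did [] = vs := PySem.Dict.getD_of_get?_eq_some g [] hvs
    have hmgd : (PySem.Dict.mk (g.items.map pvF)).getD did 0
        = (PySem.List.max? vs (fun x => x)).getD 0 := by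
      unfold PySem.Dict.getD
      rw [pv_get?_mapF]
      show ((g.get? did).map _).getD 0 = _
      rw [hvs]; rfl
    simp only [hmapc, Bool.true_eq_false, if_false, hmgd, hgd]
    rw [show (PySem.Dict.insert g did (vs ++ [v])) = (PySem.Dict.mk g.items).insert did (vs ++ [v]) from rfl,
        pv_insert_mapF, pv_mx_append vs v hvne]
  · have hmapc : (PySem.Dict.mk (g.items.map pvF)).contains did = false := by
      rw [pv_contains_mapF]; exact Bool.eq_false_iff.mpr h
    have hgd : g.getD did [] = [] :=
      PySem.Dict.getD_of_not_contains g [] (Bool.eq_false_iff.mpr h)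
    simp only [hmapc, if_pos, hgd, List.nil_append]
    rw [show (PySem.Dict.insert g did [v]) = (PySem.Dict.mk g.items).insert did [v] from rfl,
        pv_insert_mapF]
    rfl

lemma pv_hne_step (g : PySem.Dict String (List Int)) (dv : String × Int)
    (hne : ∀ p ∈ g.items, p.2 ≠ []) :
    ∀ p ∈ (pvStepG g dv).items, p.2 ≠ [] := by
  intro p hp
  unfold pvStepG PySem.Dict.modify at hp
  rcases (PySem.Dict.mem_items_insert _ _ _ _).mp hp with h1 | h2
  · subst h1; simp
  · exact hne _ h2.1

lemma pv_main (pairs : List (String × Int)) (g : PySem.Dict String (List Int))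
    (hne : ∀ p ∈ g.items, p.2 ≠ []) :
    pairs.foldl pvStepA (PySem.Dict.mk (g.items.map pvF))
      = PySem.Dict.mk ((pairs.foldl pvStepG g).items.map pvF) := by
  induction pairs generalizing g with
  | nil => rfl
  | cons dv rest ih =>
      simp only [List.foldl_cons]
      rw [pv_step g dv hne]
      exact ih _ (pv_hne_step g dv hne)

lemma pv_dicts (lst : List (String × List (String × Int))) :
    lst.foldl (fun l kv => kv.2.foldl pvStepA l) PySem.Dict.empty
      = PySem.Dict.mk (((lst.flatMap (fun kv => kv.2)).foldl pvStepG PySem.Dict.empty).items.map pvF) := by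
  rw [← List.foldl_flatMap]
  exact pv_main _ PySem.Dict.empty (by intro p hp; simp [PySem.Dict.empty] at hp)

-- ---- A's items as a function of the flattened pair list ----

lemma pv_g_keys (flat : List (String × Int)) :
    (flat.foldl pvStepG PySem.Dict.empty).keys = PySem.Set.ofList (flat.map (fun p => p.1)) := by
  have := PySem.Dict.keys_foldl_modify_key flat (fun p => p.1) ([] : List Int)
    (fun _ p => fun vs => vs ++ [p.2]) PySem.Dict.empty
  simpa [pvStepG, PySem.Set.ofList] using this

lemma pv_g_nodup (flat : List (String × Int)) :
    (flat.foldl pvStepG PySem.Dict.empty).keys.Nodup := by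
  have := PySem.Dict.nodup_keys_foldl_modify_key flat (fun p => p.1) ([] : List Int)
    (fun _ p => fun vs => vs ++ [p.2]) PySem.Dict.empty (by simp [PySem.Dict.empty])
  simpa [pvStepG] using this

lemma pv_g_getD (flat : List (String × Int)) (k : String) :
    (flat.foldl pvStepG PySem.Dict.empty).getD k [] = pvVals flat k := by
  have := PySem.Dict.getD_foldl_modify_append flat PySem.Dict.empty k
  simpa [pvStepG, pvVals, PySem.Dict.getD_empty] using this

lemma pv_items_A (lst : List (String × List (String × Int))) :
    (lst.foldl (fun l kv => kv.2.foldl pvStepA l) PySem.Dict.empty).items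
      = pvItems (lst.flatMap (fun kv => kv.2)) := by
  rw [pv_dicts]
  set flat := lst.flatMap (fun kv => kv.2)
  show ((flat.foldl pvStepG PySem.Dict.empty).items.map pvF) = _
  rw [PySem.Dict.items_eq_map_keys _ (pv_g_nodup flat) []]
  rw [pv_g_keys flat]
  simp only [List.map_map]
  unfold pvItems
  apply List.map_congr_left
  intro k _
  simp [pvF, pvMax, pv_g_getD]

-- ---- pvMax facts ----

lemma pv_max_spec (vs : List Int) (h : vs ≠ []) :
    pvMax vs ∈ vs ∧ ∀ y ∈ vs, y ≤ pvMax vs := by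
  obtain ⟨m, hm⟩ := Option.ne_none_iff_exists'.mp
    (fun hn => h ((PySem.List.max?_eq_none_iff vs (fun x => x)).mp hn))
  have h1 := PySem.List.max?_mem hm
  have h2 := PySem.List.max?_isMax hm
  unfold pvMax
  rw [hm]
  exact ⟨h1, h2⟩

lemma pv_max_unique (vs : List Int) (m : Int) (hm : m ∈ vs) (hall : ∀ y ∈ vs, y ≤ m) :
    pvMax vs = m := by
  have hne : vs ≠ [] := by rintro rfl; simp at hm
  obtain ⟨h1, h2⟩ := pv_max_spec vs hne
  exact le_antisymm (hall _ h1) (h2 _ hm)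

lemma pv_mem_vals (flat : List (String × Int)) (k : String) (y : Int) :
    y ∈ pvVals flat k ↔ (k, y) ∈ flat := by
  simp only [pvVals, List.mem_map, List.mem_filter]
  constructor
  · rintro ⟨p, ⟨hp, hk⟩, rfl⟩
    have : p.1 = k := by simpa using hk
    rw [show (k, p.2) = p from by ext <;> simp [this]]
    exact hp
  · intro h
    exact ⟨(k, y), ⟨h, by simp⟩, rfl⟩

-- ---- the sweep loop ----

lemma pv_contains_mem (s : PySem.Set String) (k : String) :
    PySem.Set.contains s k = true ↔ k ∈ s := by
  simp [PySem.Set.contains]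

lemma pv_contains_add (s : PySem.Set String) (x k : String) :
    PySem.Set.contains (PySem.Set.add s x) k = true ↔ (k ∈ s ∨ k = x) := by
  rw [pv_contains_mem]; exact PySem.Set.mem_add s x k

lemma pv_fold (r : List (String × Int)) (out : List (String × Int)) (seen : PySem.Set String) :
    (r.foldl pvStep (out, seen)).1 = out ++ pvKeep seen r := by
  induction r generalizing out seen with
  | nil => simp [pvKeep]
  | cons p t ih =>
      simp only [List.foldl_cons, pvKeep, pvStep]
      by_cases h : PySem.Set.contains seen p.1 = true
      · simp only [h, if_pos]; exact ih out seen
      · rw [Bool.not_eq_true] at h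
        simp only [h, Bool.false_eq_true, if_neg, not_false_iff]
        rw [ih]
        simp

lemma pv_keep_sublist (seen : PySem.Set String) (r : List (String × Int)) :
    (pvKeep seen r).Sublist r := by
  induction r generalizing seen with
  | nil => simp [pvKeep]
  | cons p t ih =>
      simp only [pvKeep]
      split_ifs with h
      · exact (ih seen).cons p
      · exact (ih _).cons₂ p

lemma pv_keep_not_seen (seen : PySem.Set String) (r : List (String × Int)) :
    ∀ p ∈ pvKeep seen r, PySem.Set.contains seen p.1 = false := by
  induction r generalizing seen with
  | nil => simp [pvKeep]
  | cons q t ih =>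
      intro p hp
      simp only [pvKeep] at hp
      split_ifs at hp with h
      · exact ih seen p hp
      · rcases List.mem_cons.mp hp with rfl | hp'
        · exact Bool.eq_false_iff.mpr h
        · have := ih _ p hp'
          rw [Bool.eq_false_iff] at this ⊢
          intro hc
          exact this ((pv_contains_add seen q.1 p.1).mpr (Or.inl ((pv_contains_mem _ _).mp hc)))

lemma pv_keep_nodup (seen : PySem.Set String) (r : List (String × Int)) :
    ((pvKeep seen r).map (fun p => p.1)).Nodup := by
  induction r generalizing seen with
  | nil => simp [pvKeep]
  | cons q t ih =>
      simp only [pvKeep]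
      split_ifs with h
      · exact ih seen
      · simp only [List.map_cons, List.nodup_cons]
        refine ⟨?_, ih _⟩
        intro hc
        obtain ⟨p, hp, hk⟩ := List.mem_map.mp hc
        have := pv_keep_not_seen _ _ p hp
        rw [hk, Bool.eq_false_iff] at this
        exact this ((pv_contains_add seen q.1 q.1).mpr (Or.inr rfl))

lemma pv_keep_keys (seen : PySem.Set String) (r : List (String × Int)) (k : String) :
    k ∈ (pvKeep seen r).map (fun p => p.1)
      ↔ (k ∈ r.map (fun p => p.1) ∧ PySem.Set.contains seen k = false) := by
  induction r generalizing seen with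
  | nil => simp [pvKeep]
  | cons q t ih =>
      simp only [pvKeep]
      split_ifs with h
      · rw [ih]
        simp only [List.map_cons, List.mem_cons]
        constructor
        · rintro ⟨h1, h2⟩; exact ⟨Or.inr h1, h2⟩
        · rintro ⟨h1 | h1, h2⟩
          · subst h1; rw [h] at h2; cases h2
          · exact ⟨h1, h2⟩
      · simp only [List.map_cons, List.mem_cons, ih]
        constructor
        · rintro (rfl | ⟨h1, h2⟩)
          · exact ⟨Or.inl rfl, Bool.eq_false_iff.mpr h⟩
          · refine ⟨Or.inr h1, ?_⟩
            rw [Bool.eq_false_iff] at h2 ⊢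
            intro hc
            exact h2 ((pv_contains_add seen q.1 k).mpr (Or.inl ((pv_contains_mem _ _).mp hc)))
        · rintro ⟨rfl | h1, h2⟩
          · exact Or.inl rfl
          · by_cases hk : k = q.1
            · exact Or.inl hk
            · refine Or.inr ⟨h1, ?_⟩
              rw [Bool.eq_false_iff] at h2 ⊢
              intro hc
              rcases (pv_contains_add seen q.1 k).mp hc with hm | hm
              · exact h2 ((pv_contains_mem _ _).mpr hm)
              · exact hk hm

lemma pv_keep_find (seen : PySem.Set String) (r : List (String × Int)) (p : String × Int)
    (hp : p ∈ pvKeep seen r) :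
    r.find? (fun q => q.1 == p.1) = some p := by
  induction r generalizing seen with
  | nil => simp [pvKeep] at hp
  | cons q t ih =>
      simp only [pvKeep] at hp
      split_ifs at hp with h
      · have hne : q.1 ≠ p.1 := by
          intro he
          have := pv_keep_not_seen seen t p hp
          rw [← he, h] at this; cases this
        rw [List.find?_cons_of_neg (by simpa using hne)]
        exact ih seen hp
      · rcases List.mem_cons.mp hp with rfl | hp'
        · rw [List.find?_cons_of_pos (by simp)]
        · have hne : q.1 ≠ p.1 := by
            intro he
            have := pv_keep_not_seen _ t p hp'
            rw [Bool.eq_false_iff] at this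
            exact this ((pv_contains_add seen q.1 p.1).mpr (Or.inr he.symm))
          rw [List.find?_cons_of_neg (by simpa using hne)]
          exact ih _ hp'

-- ---- sorted2 with tuple key = sorted with the lexicographic key ----

lemma pv_sorted2_eq (xs : List (String × Int)) :
    PySem.List.sorted2 xs (fun kv => kv.2) (fun kv => kv.1) = PySem.List.sorted xs pvKey := by
  show List.foldl (fun acc x => PySem.List.insertBy
      (fun a b => decide (a.2 < b.2) || (!decide (b.2 < a.2) && decide (a.1 < b.1))) x acc) [] xs
    = List.foldl (fun acc x => PySem.List.insertBy
      (fun a b => decide (pvKey a < pvKey b)) x acc) [] xs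
  have hb : (fun (a b : String × Int) => decide (a.2 < b.2) || (!decide (b.2 < a.2) && decide (a.1 < b.1)))
      = fun a b => decide (pvKey a < pvKey b) := by
    funext a b
    by_cases h1 : a.2 < b.2
    · simp [pvKey, Prod.Lex.lt_iff, h1]
    · by_cases h2 : b.2 < a.2
      · have hne : a.2 ≠ b.2 := ne_of_gt h2
        simp [pvKey, Prod.Lex.lt_iff, h1, h2, hne]
      · have he : a.2 = b.2 := le_antisymm (not_lt.1 h2) (not_lt.1 h1)
        simp [pvKey, Prod.Lex.lt_iff, he]
  rw [hb]

-- last occurrence of a key in the sorted list carries the maximal value of that key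
lemma pv_last_max (s : List (String × Int))
    (hpair : s.Pairwise (fun a b => pvKey a ≤ pvKey b))
    (p : String × Int) (hf : s.reverse.find? (fun q => q.1 == p.1) = some p) :
    p ∈ s ∧ ∀ q ∈ s, q.1 = p.1 → q.2 ≤ p.2 := by
  obtain ⟨-, as, bs, hsplit, hnone⟩ := List.find?_eq_some_iff_append.mp hf
  have hs : s = bs.reverse ++ p :: as.reverse := by
    have := congrArg List.reverse hsplit
    simpa [List.reverse_append] using this
  constructor
  · rw [hs]; simp
  · intro q hq hk
    rw [hs] at hq hpair
    rcases List.mem_append.mp hq with hq1 | hq2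
    · have hle : pvKey q ≤ pvKey p :=
        (List.pairwise_append.mp hpair).2.2 q hq1 p (List.mem_cons_self)
      rcases Prod.Lex.le_iff.mp hle with hlt | ⟨heq, -⟩
      · exact le_of_lt (by simpa [pvKey] using hlt)
      · exact le_of_eq (by simpa [pvKey] using heq)
    · rcases List.mem_cons.mp hq2 with rfl | hq3
      · exact le_refl _
      · exfalso
        have := hnone q (List.mem_reverse.mp hq3)
        simp [hk] at this

-- ===== VERDICT (by name: the statement is the Claim_ definition above) =====
theorem psort_spec : Claim_equal_psort := by
  intro lst _
  show psort lst = psort_alt lst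
  show PySem.List.sorted2
      ((lst.foldl (fun l kv => kv.2.foldl pvStepA l) PySem.Dict.empty).items)
      (fun kv => kv.2) (fun kv => kv.1)
    = ((((PySem.List.sorted2 (lst.flatMap (fun kv => kv.2)) (fun kv => kv.2) (fun kv => kv.1)).reverse).foldl
        pvStep ([], PySem.Set.empty)).1).reverse
  rw [pv_items_A, pv_sorted2_eq, pv_sorted2_eq, pv_fold, List.nil_append]
  set flat := lst.flatMap (fun kv => kv.2) with hflat
  set s := PySem.List.sorted flat pvKey with hsdef
  set K := pvKeep PySem.Set.empty s.reverse with hK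
  have hperm_s : s.Perm flat := PySem.List.sorted_perm flat pvKey false
  have hpair_s : s.Pairwise (fun a b => pvKey a ≤ pvKey b) := PySem.List.sorted_pairwise flat pvKey
  have h_subB : K.reverse.Sublist s := by
    simpa using (pv_keep_sublist PySem.Set.empty s.reverse).reverse
  have h_pair_le : K.reverse.Pairwise (fun a b => pvKey a ≤ pvKey b) := hpair_s.sublist h_subB
  have h_keys_nodupB : (K.reverse.map (fun p => p.1)).Nodup := by
    have := pv_keep_nodup PySem.Set.empty s.reverse
    simpa [List.map_reverse, List.nodup_reverse] using this
  have h_ne : K.reverse.Pairwise (fun a b => a.1 ≠ b.1) := by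
    have := List.pairwise_map.mp h_keys_nodupB
    exact this
  have h_pair_lt : K.reverse.Pairwise (fun a b => pvKey a < pvKey b) := by
    refine (h_pair_le.and h_ne).imp ?_
    rintro a b ⟨hle, hne⟩
    refine lt_of_le_of_ne hle (fun he => hne ?_)
    have := toLex_inj.mp he
    exact congrArg Prod.snd this
  have dirA : ∀ p ∈ K.reverse, p ∈ pvItems flat := by
    intro p hp
    have hpK : p ∈ K := List.mem_reverse.mp hp
    have hf := pv_keep_find _ _ _ hpK
    obtain ⟨hps, hmaxs⟩ := pv_last_max s hpair_s p hf
    have hpflat : p ∈ flat := hperm_s.mem_iff.mp hps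
    have hmx : pvMax (pvVals flat p.1) = p.2 := by
      apply pv_max_unique
      · exact (pv_mem_vals _ _ _).mpr (by rw [Prod.mk.eta]; exact hpflat)
      · intro y hy
        have hyf : (p.1, y) ∈ flat := (pv_mem_vals _ _ _).mp hy
        exact hmaxs _ (hperm_s.mem_iff.mpr hyf) rfl
    unfold pvItems
    apply List.mem_map.mpr
    refine ⟨p.1, (PySem.Set.mem_ofList _ _).mpr (List.mem_map.mpr ⟨p, hpflat, rfl⟩), ?_⟩
    rw [hmx, Prod.mk.eta]
  have dirB : ∀ p ∈ pvItems flat, p ∈ K.reverse := by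
    intro p hp
    obtain ⟨k, hk, rfl⟩ := List.mem_map.mp hp
    have hkf : k ∈ flat.map (fun p => p.1) := by
      simpa using (PySem.Set.mem_ofList _ _).mp hk
    have hkr : k ∈ s.reverse.map (fun p => p.1) := by
      obtain ⟨q, hq, rfl⟩ := List.mem_map.mp hkf
      exact List.mem_map.mpr ⟨q, List.mem_reverse.mpr (hperm_s.mem_iff.mpr hq), rfl⟩
    have hkK : k ∈ K.map (fun p => p.1) := by
      rw [hK]
      exact (pv_keep_keys _ _ _).mpr ⟨hkr, rfl⟩
    obtain ⟨p', hp', hpk⟩ := List.mem_map.mp hkK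
    have hp'out : p' ∈ K.reverse := List.mem_reverse.mpr hp'
    obtain ⟨k2, _, heq⟩ := List.mem_map.mp (dirA p' hp'out)
    have hk2 : k2 = k := by rw [← hpk, ← heq]
    have : p' = (k, pvMax (pvVals flat k)) := by rw [← heq, hk2]
    rwa [this] at hp'out
  have hnodupB : K.reverse.Nodup := h_keys_nodupB.of_map
  have hnodupI : (pvItems flat).Nodup := by
    have hkeys : ((pvItems flat).map (fun p => p.1)).Nodup := by
      unfold pvItems
      simp only [List.map_map, Function.comp_def, List.map_id_fun', id]
      exact PySem.Set.nodup_ofList (flat.map (fun p => p.1))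
    exact hkeys.of_map
  have hpermB : (K.reverse).Perm (pvItems flat) :=
    (List.perm_ext_iff_of_nodup hnodupB hnodupI).mpr (fun p => ⟨dirA p, dirB p⟩)
  exact PySem.List.sorted_eq_of_perm_of_pairwise_lt _ _ _ hpermB h_pair_lt
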